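-- pv_equiv track=rewrite | github.com/gloryape/triune-sanctuary | src/aspects/enhanced_experiential.py | _find_sequence_patterns
-- ===== SOURCE A (Python) =====
-- from typing import Dict, List, Optional, Tuple, Any
--
-- def _find_sequence_patterns(emotions: List[str]) -> List[str]:
--     """Find patterns in emotional sequences."""
--     if len(emotions) < 3:
--         return []
--
--     patterns = []
--     # Look for repeating sequences of 2-3 emotions
--     for length in [2, 3]:
--         for i in range(len(emotions) - length * 2 + 1):
--             sequence = emotions[i:i+length]
--             for j in range(i + length, len(emotions) - length + 1):
--                 if emotions[j:j+length] == sequence: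
--                     patterns.append(' -> '.join(sequence))
--                     break
--
--     return patterns
-- ===== SOURCE B (Python) =====
-- def _find_sequence_patterns(emotions):
--     """Find patterns in emotional sequences (one pass per length via a last-occurrence index)."""
--     n = len(emotions)
--     if n < 3:
--         return []
--     patterns = []
--     for length in (2, 3):
--         last = {}
--         for j in range(n - length + 1):
--             last[tuple(emotions[j:j + length])] = j
--         for i in range(n - length * 2 + 1):
--             if last.get(tuple(emotions[i:i + length]), -1) >= i + length:
--                 patterns.append(' -> '.join(emotions[i:i + length]))
--     return patterns
-- ===== Notes on version B (the rewrite author's own statement) =====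
-- stated objective: faster
-- what changed: For each length, B builds one dictionary mapping each length-L window to its last start position, replacing A's inner forward rescan of the list for every start position with a single O(1) lookup.
import Mathlib
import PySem

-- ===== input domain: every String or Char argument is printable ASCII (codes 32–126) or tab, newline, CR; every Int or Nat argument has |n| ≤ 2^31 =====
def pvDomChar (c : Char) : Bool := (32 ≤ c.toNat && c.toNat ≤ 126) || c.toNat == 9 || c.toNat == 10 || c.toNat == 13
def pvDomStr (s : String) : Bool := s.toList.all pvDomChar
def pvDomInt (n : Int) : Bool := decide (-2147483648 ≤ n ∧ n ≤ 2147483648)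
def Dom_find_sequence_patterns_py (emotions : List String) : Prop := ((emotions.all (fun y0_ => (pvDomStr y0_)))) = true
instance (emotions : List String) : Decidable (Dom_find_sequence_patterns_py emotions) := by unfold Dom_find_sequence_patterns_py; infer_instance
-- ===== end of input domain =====

-- B replaces A's inner rescan of the list for each start position by a last-occurrence
-- dictionary built once per length (objective: faster).

-- ===== PORT A =====
def find_sequence_patterns_py (emotions : List String) : List String :=
  if emotions.length < 3 then []
  else
    [(2 : Int), 3].foldl (fun patterns length =>
      (PySem.List.pyRange 0 ((emotions.length : Int) - length * 2 + 1) 1).foldl (fun patterns i =>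
        let sequence := PySem.List.slice emotions (some i) (some (i + length))
        match (PySem.List.pyRange (i + length) ((emotions.length : Int) - length + 1) 1).find?
            (fun j => PySem.List.slice emotions (some j) (some (j + length)) == sequence) with
        | some _ => patterns ++ [PySem.Str.join " -> " sequence]
        | none => patterns) patterns) []

-- ===== PORT B =====
def find_sequence_patterns_py_alt (emotions : List String) : List String :=
  if emotions.length < 3 then []
  else
    [(2 : Int), 3].foldl (fun patterns length =>
      let last :=
        (PySem.List.pyRange 0 ((emotions.length : Int) - length + 1) 1).foldl
          (fun d j => d.insert (PySem.List.slice emotions (some j) (some (j + length))) j)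
          (PySem.Dict.empty (κ := List String) (ν := Int))
      (PySem.List.pyRange 0 ((emotions.length : Int) - length * 2 + 1) 1).foldl (fun patterns i =>
        if i + length ≤ last.getD (PySem.List.slice emotions (some i) (some (i + length))) (-1)
        then patterns ++ [PySem.Str.join " -> " (PySem.List.slice emotions (some i) (some (i + length)))]
        else patterns) patterns) []

-- ===== PRECONDITION & SPEC =====
def Spec_find_sequence_patterns_py (emotions : List String) (out : List String) : Prop := out = find_sequence_patterns_py_alt emotions
instance (emotions : List String) (out : List String) : Decidable (Spec_find_sequence_patterns_py emotions out) := by unfold Spec_find_sequence_patterns_py; infer_instance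

-- ===== CLAIM (what is proved, stated in full; the proofs are below) =====
def Claim_equal_find_sequence_patterns_py : Prop := ∀ (emotions : List String), Dom_find_sequence_patterns_py emotions → Spec_find_sequence_patterns_py emotions (find_sequence_patterns_py emotions)

-- ===== LEMMAS AND PROOFS =====

-- B's dictionary holds, for each length-L slice, its last start position below m:
-- its lookup is ≥ t exactly when some start position j with t ≤ j < m carries that slice.
theorem pv_dict_getD (emotions : List String) (L : Int) (m : Nat) (k : List String) (t : Int)
    (ht : 0 < t) :
    (t ≤ ((PySem.List.pyRange 0 (m : Int) 1).foldl
        (fun d j => d.insert (PySem.List.slice emotions (some j) (some (j + L))) j)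
        (PySem.Dict.empty (κ := List String) (ν := Int))).getD k (-1))
    ↔ ∃ j : Int, 0 ≤ j ∧ j < (m : Int) ∧
        PySem.List.slice emotions (some j) (some (j + L)) = k ∧ t ≤ j := by
  induction m with
  | zero =>
      simp [PySem.List.pyRange_one_eq_nil (by omega : (0:Int) ≤ 0), PySem.Dict.getD_empty]
      constructor
      · intro h; omega
      · rintro ⟨j, h1, h2, _⟩; omega
  | succ m ih =>
      rw [show ((m + 1 : Nat) : Int) = (m : Int) + 1 by push_cast; ring,
        PySem.List.pyRange_one_succ_right (by positivity), List.foldl_append]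
      simp only [List.foldl_cons, List.foldl_nil]
      rw [PySem.Dict.getD_insert]
      by_cases h : k = PySem.List.slice emotions (some (m : Int)) (some ((m : Int) + L))
      · simp only [if_pos h]
        constructor
        · intro hm; exact ⟨(m : Int), by positivity, by omega, h.symm, hm⟩
        · rintro ⟨j, h1, h2, h3, h4⟩; omega
      · simp only [if_neg h]
        rw [ih]
        constructor
        · rintro ⟨j, h1, h2, h3, h4⟩; exact ⟨j, h1, by omega, h3, h4⟩
        · rintro ⟨j, h1, h2, h3, h4⟩
          refine ⟨j, h1, ?_, h3, h4⟩
          rcases lt_or_eq_of_le (by omega : j ≤ (m : Int)) with hlt | heq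
          · exact hlt
          · exact absurd (heq ▸ h3).symm h

-- for one sequence length L, A's loop (inner rescan with break) equals B's loop (dictionary lookup)
theorem pv_lengths (emotions : List String) (L : Int) (hL : 0 < L) (init : List String) :
    (PySem.List.pyRange 0 ((emotions.length : Int) - L * 2 + 1) 1).foldl (fun patterns i =>
        let sequence := PySem.List.slice emotions (some i) (some (i + L))
        match (PySem.List.pyRange (i + L) ((emotions.length : Int) - L + 1) 1).find?
            (fun j => PySem.List.slice emotions (some j) (some (j + L)) == sequence) with
        | some _ => patterns ++ [PySem.Str.join " -> " sequence]
        | none => patterns) init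
    = (let last :=
        (PySem.List.pyRange 0 ((emotions.length : Int) - L + 1) 1).foldl
          (fun d j => d.insert (PySem.List.slice emotions (some j) (some (j + L))) j)
          (PySem.Dict.empty (κ := List String) (ν := Int))
      (PySem.List.pyRange 0 ((emotions.length : Int) - L * 2 + 1) 1).foldl (fun patterns i =>
        if i + L ≤ last.getD (PySem.List.slice emotions (some i) (some (i + L))) (-1)
        then patterns ++ [PySem.Str.join " -> " (PySem.List.slice emotions (some i) (some (i + L)))]
        else patterns) init) := by
  set n : Int := (emotions.length : Int) with hn
  have hn0 : 0 ≤ n := by positivity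
  by_cases hemp : n - L * 2 + 1 ≤ 0
  · rw [PySem.List.pyRange_one_eq_nil hemp]
    simp
  · have hb : 0 ≤ n - L + 1 := by omega
    simp only []
    apply PySem.List.foldl_congr_mem
    intro acc i hi
    have hi' : 0 ≤ i ∧ i < n - L * 2 + 1 := (PySem.List.mem_pyRange_one).mp hi
    have hcast : ((n - L + 1).toNat : Int) = n - L + 1 := Int.toNat_of_nonneg hb
    have hiff :
        (i + L ≤ ((PySem.List.pyRange 0 (n - L + 1) 1).foldl
            (fun d j => d.insert (PySem.List.slice emotions (some j) (some (j + L))) j)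
            (PySem.Dict.empty (κ := List String) (ν := Int))).getD
            (PySem.List.slice emotions (some i) (some (i + L))) (-1))
        ↔ ∃ j : Int, i + L ≤ j ∧ j < n - L + 1 ∧
            PySem.List.slice emotions (some j) (some (j + L))
              = PySem.List.slice emotions (some i) (some (i + L)) := by
      rw [← hcast, pv_dict_getD emotions L _ _ _ (by omega)]
      constructor
      · rintro ⟨j, h1, h2, h3, h4⟩; exact ⟨j, h4, by omega, h3⟩
      · rintro ⟨j, h1, h2, h3⟩; exact ⟨j, by omega, by omega, h3, h1⟩
    cases hfind : (PySem.List.pyRange (i + L) (n - L + 1) 1).find?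
        (fun j => PySem.List.slice emotions (some j) (some (j + L))
          == PySem.List.slice emotions (some i) (some (i + L))) with
    | some j =>
        have hmem := List.mem_of_find?_eq_some hfind
        have hp := List.find?_some hfind
        have hj := (PySem.List.mem_pyRange_one).mp hmem
        have hcond : i + L ≤ ((PySem.List.pyRange 0 (n - L + 1) 1).foldl
            (fun d j => d.insert (PySem.List.slice emotions (some j) (some (j + L))) j)
            (PySem.Dict.empty (κ := List String) (ν := Int))).getD
            (PySem.List.slice emotions (some i) (some (i + L))) (-1) :=
          hiff.mpr ⟨j, hj.1, hj.2, by simpa using hp⟩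
        simp only [if_pos hcond]
    | none =>
        have hnone := List.find?_eq_none.mp hfind
        have hcond : ¬ (i + L ≤ ((PySem.List.pyRange 0 (n - L + 1) 1).foldl
            (fun d j => d.insert (PySem.List.slice emotions (some j) (some (j + L))) j)
            (PySem.Dict.empty (κ := List String) (ν := Int))).getD
            (PySem.List.slice emotions (some i) (some (i + L))) (-1)) := by
          intro hc
          rcases hiff.mp hc with ⟨j, h1, h2, h3⟩
          exact hnone j ((PySem.List.mem_pyRange_one).mpr ⟨h1, h2⟩) (by simpa using h3)
        simp only [if_neg hcond]

-- ===== VERDICT (by name: the statement is the Claim_ definition above) =====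
theorem find_sequence_patterns_py_spec : Claim_equal_find_sequence_patterns_py := by
  intro emotions _
  unfold Spec_find_sequence_patterns_py find_sequence_patterns_py find_sequence_patterns_py_alt
  by_cases h : emotions.length < 3
  · simp [h]
  · simp only [if_neg h, List.foldl_cons, List.foldl_nil]
    rw [pv_lengths emotions 2 (by norm_num), pv_lengths emotions 3 (by norm_num)]
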